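-- pv_equiv track=rewrite | github.com/RajeevAtla/chexmix | src/pgn/writer.py | _format_movetext
-- ===== SOURCE A (Python) =====
-- def _format_movetext(moves: list[str], result: str) -> str:
--     """Format movetext lines with move numbers and result.
--
--     Args:
--         moves: List of move tokens (SAN or coordinate).
--         result: Game result token (e.g., "1-0").
--
--     Returns:
--         Movetext string suitable for PGN output.
--     """
--     # Group moves into white/black pairs with move numbers.
--     parts: list[str] = []
--     for idx in range(0, len(moves), 2):
--         move_no = (idx // 2) + 1
--         white_move = moves[idx]
--         if idx + 1 < len(moves):
--             black_move = moves[idx + 1]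
--             parts.append(f"{move_no}. {white_move} {black_move}")
--         else:
--             parts.append(f"{move_no}. {white_move}")
--     parts.append(result)
--     return " ".join(parts)
-- ===== SOURCE B (Python) =====
-- def _format_movetext(moves: list[str], result: str) -> str:
--     """Format movetext with move numbers and result (flat token stream)."""
--     tokens: list[str] = []
--     for i, m in enumerate(moves):
--         if i % 2 == 0:
--             tokens.append(f"{i // 2 + 1}.")
--         tokens.append(m)
--     tokens.append(result)
--     return " ".join(tokens)
-- ===== Notes on version B (the rewrite author's own statement) =====
-- stated objective: simpler
-- what changed: Instead of stepping over index pairs and building one pre-joined 'n. white black' string per pair, B walks the moves one by one with enumerate and emits a flat token list (a number token before each white move, then the move), joining everything once at the end.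
import Mathlib
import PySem

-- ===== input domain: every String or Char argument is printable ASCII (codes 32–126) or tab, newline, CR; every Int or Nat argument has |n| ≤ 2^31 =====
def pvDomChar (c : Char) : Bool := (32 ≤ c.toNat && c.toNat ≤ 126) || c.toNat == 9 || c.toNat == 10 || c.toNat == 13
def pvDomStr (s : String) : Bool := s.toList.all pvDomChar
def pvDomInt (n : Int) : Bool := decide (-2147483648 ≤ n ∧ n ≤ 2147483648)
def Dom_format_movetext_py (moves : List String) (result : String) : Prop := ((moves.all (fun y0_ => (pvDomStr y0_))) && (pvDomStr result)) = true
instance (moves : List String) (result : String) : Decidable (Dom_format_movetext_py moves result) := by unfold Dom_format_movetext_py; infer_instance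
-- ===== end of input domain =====

-- B walks the moves one by one (enumerate) emitting flat tokens, instead of A's index loop
-- stepping by two that pre-joins each "n. white black" pair; same O(n) cost, flatter code.

-- ===== PORT A =====
-- A's loop 'for idx in range(0, len(moves), 2)' as the obvious recursion on idx (idx < len,
-- step 2) carrying the accumulating parts list; moves[idx] is always in range here, so
-- .getD "" on PySem.List.pyGet? is never taken (exact port of Python's indexing).
def aLoop (moves : List String) (idx : Nat) (parts : List String) : List String :=
  if _h : idx < moves.length then
    let move_no : Int := ((idx / 2 + 1 : Nat) : Int)
    let white := (PySem.List.pyGet? moves (idx : Int)).getD ""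
    aLoop moves (idx + 2)
      (if idx + 1 < moves.length then
        parts ++ [PySem.Int.toStr move_no ++ ". " ++ white ++ " " ++
          (PySem.List.pyGet? moves ((idx + 1 : Nat) : Int)).getD ""]
      else
        parts ++ [PySem.Int.toStr move_no ++ ". " ++ white])
  else parts
termination_by moves.length - idx

def format_movetext_py (moves : List String) (result : String) : String :=
  PySem.Str.join " " (aLoop moves 0 [] ++ [result])

-- ===== PORT B =====
-- B's 'for i, m in enumerate(moves)' as structural recursion on the move list with index i.
def bLoop (i : Nat) : List String → List String
  | [] => []
  | m :: rest =>
    (if i % 2 = 0 then [PySem.Int.toStr ((i / 2 + 1 : Nat) : Int) ++ "."] else []) ++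
      [m] ++ bLoop (i + 1) rest

def format_movetext_py_alt (moves : List String) (result : String) : String :=
  PySem.Str.join " " (bLoop 0 moves ++ [result])

-- ===== PRECONDITION & SPEC =====
def Spec_format_movetext_py (moves : List String) (result : String) (out : String) : Prop := out = format_movetext_py_alt moves result
instance (moves : List String) (result : String) (out : String) : Decidable (Spec_format_movetext_py moves result out) := by unfold Spec_format_movetext_py; infer_instance

-- ===== CLAIM (what is proved, stated in full; the proofs are below) =====
def Claim_equal_format_movetext_py : Prop := ∀ (moves : List String) (result : String), Dom_format_movetext_py moves result → Spec_format_movetext_py moves result (format_movetext_py moves result)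

-- ===== LEMMAS AND PROOFS =====

-- A's loop without the accumulator (proof helper).
def gLoop (moves : List String) (idx : Nat) : List String :=
  if idx < moves.length then
    (if idx + 1 < moves.length then
      [PySem.Int.toStr ((idx / 2 + 1 : Nat) : Int) ++ ". " ++
        (PySem.List.pyGet? moves (idx : Int)).getD "" ++ " " ++
        (PySem.List.pyGet? moves ((idx + 1 : Nat) : Int)).getD ""]
    else
      [PySem.Int.toStr ((idx / 2 + 1 : Nat) : Int) ++ ". " ++
        (PySem.List.pyGet? moves (idx : Int)).getD ""]) ++ gLoop moves (idx + 2)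
  else []
termination_by moves.length - idx
decreasing_by omega

-- Common shape: the list of A's pair-strings for the moves from pair number k+1 on.
def fmt (k : Nat) : List String → List String
  | [] => []
  | [w] => [PySem.Int.toStr ((k + 1 : Nat) : Int) ++ ". " ++ w]
  | w :: b :: rest =>
      (PySem.Int.toStr ((k + 1 : Nat) : Int) ++ ". " ++ w ++ " " ++ b) :: fmt (k + 1) rest

theorem aLoop_g (moves : List String) (idx : Nat) (parts : List String) :
    aLoop moves idx parts = parts ++ gLoop moves idx := by
  rw [aLoop, gLoop]
  by_cases h : idx < moves.length
  · simp only [h, dif_pos, if_pos]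
    rw [aLoop_g moves (idx + 2)]
    split <;> simp
  · simp [h]
termination_by moves.length - idx
decreasing_by omega

theorem gLoop_fmt (moves : List String) (k : Nat) :
    gLoop moves (2 * k) = fmt k (moves.drop (2 * k)) := by
  rcases hd : moves.drop (2 * k) with _ | ⟨w, tail⟩
  · have hlen : moves.length ≤ 2 * k := by
      have := List.drop_eq_nil_iff.mp hd
      omega
    rw [gLoop]
    simp [Nat.not_lt.mpr hlen, fmt]
  · have hlt : 2 * k < moves.length := by
      by_contra hc
      rw [List.drop_eq_nil_of_le (by omega)] at hd
      exact (List.cons_ne_nil _ _ hd.symm).elim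
    have hw : moves[2 * k]? = some w := by
      have h0 : (moves.drop (2 * k))[0]? = some w := by rw [hd]; rfl
      simpa using h0
    have hget : (PySem.List.pyGet? moves ((2 * k : Nat) : Int)).getD "" = w := by
      rw [PySem.List.pyGet?_natCast, hw]; rfl
    have hdropS : moves.drop (2 * k + 1) = tail := by
      have h1 : (moves.drop (2 * k)).drop 1 = tail := by rw [hd]; rfl
      rw [List.drop_drop] at h1
      exact h1
    have hno : (2 * k) / 2 + 1 = k + 1 := by omega
    have hrec : gLoop moves (2 * k + 2) = fmt (k + 1) (moves.drop (2 * k + 2)) := by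
      have h2 := gLoop_fmt moves (k + 1)
      have he : 2 * (k + 1) = 2 * k + 2 := by omega
      rw [he] at h2
      exact h2
    rcases htail : tail with _ | ⟨b, rest⟩
    · -- odd leftover white move
      have hlen1 : moves.length = 2 * k + 1 := by
        have h1 : (moves.drop (2 * k)).length = moves.length - 2 * k := by simp
        rw [hd, htail] at h1
        simp at h1
        omega
      rw [gLoop, if_pos hlt, if_neg (by omega)]
      rw [hrec, List.drop_eq_nil_of_le (by omega)]
      simp only [fmt, List.append_nil]
      rw [hget, hno]
    · -- full pair
      have hb : moves[2 * k + 1]? = some b := by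
        have h0 : (moves.drop (2 * k + 1))[0]? = some b := by rw [hdropS, htail]; rfl
        simpa using h0
      have hlt1 : 2 * k + 1 < moves.length := (List.getElem?_eq_some_iff.mp hb).1
      have hgetb : (PySem.List.pyGet? moves ((2 * k + 1 : Nat) : Int)).getD "" = b := by
        rw [PySem.List.pyGet?_natCast, hb]; rfl
      have hdrop2 : moves.drop (2 * k + 2) = rest := by
        have h1 : (moves.drop (2 * k + 1)).drop 1 = rest := by rw [hdropS, htail]; rfl
        rw [List.drop_drop] at h1
        exact h1
      rw [gLoop, if_pos hlt, if_pos (by omega)]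
      rw [hrec, hdrop2]
      simp only [fmt, List.singleton_append]
      rw [hget, hgetb, hno]
termination_by moves.length - 2 * k
decreasing_by omega

theorem jl (x y : List Char) (xs : List (List Char)) :
    PySem.Chars.join [' '] (x :: y :: xs) = x ++ ' ' :: PySem.Chars.join [' '] (y :: xs) := by
  rw [PySem.Chars.join_cons_cons]
  simp

theorem jl2 (x : List Char) (ys : List (List Char)) (h : ys ≠ []) :
    PySem.Chars.join [' '] (x :: ys) = x ++ ' ' :: PySem.Chars.join [' '] ys := by
  rcases ys with _ | ⟨y, xs⟩
  · exact (h rfl).elim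
  · exact jl x y xs

theorem join_tokens (k : Nat) (l : List String) (r : String) :
    PySem.Chars.join [' '] ((bLoop (2 * k) l ++ [r]).map String.toList) =
      PySem.Chars.join [' '] ((fmt k l ++ [r]).map String.toList) := by
  have edot : ("." : String).toList = ['.'] := rfl
  have edots : (". " : String).toList = ['.', ' '] := rfl
  rcases l with _ | ⟨w, tail⟩
  · rfl
  · rcases tail with _ | ⟨b, rest⟩
    · -- single white move
      have hno : 2 * k / 2 + 1 = k + 1 := by omega
      rw [bLoop, if_pos (by omega : 2 * k % 2 = 0), bLoop]
      simp only [fmt, List.cons_append, List.nil_append, List.map_cons, List.map_nil, hno]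
      rw [jl, jl, PySem.Chars.join_singleton, jl, PySem.Chars.join_singleton]
      simp [edot, edots]
    · -- full pair, then recurse
      have hno : 2 * k / 2 + 1 = k + 1 := by omega
      rw [bLoop, if_pos (by omega : 2 * k % 2 = 0), bLoop,
        if_neg (by omega : ¬(2 * k + 1) % 2 = 0)]
      have hstep : 2 * k + 1 + 1 = 2 * (k + 1) := by omega
      rw [hstep]
      have IH := join_tokens (k + 1) rest r
      simp only [fmt, List.cons_append, List.nil_append, List.map_cons, hno] at IH ⊢
      rw [jl, jl, jl2 _ _ (by simp), jl2 _ _ (by simp), IH]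
      simp [edot, edots]
termination_by l.length
decreasing_by simp

-- ===== VERDICT (by name: the statement is the Claim_ definition above) =====
theorem format_movetext_py_spec : Claim_equal_format_movetext_py := by
  intro moves result _
  unfold Spec_format_movetext_py format_movetext_py format_movetext_py_alt
  have hA : aLoop moves 0 [] = fmt 0 moves := by
    rw [aLoop_g, List.nil_append]
    have h0 := gLoop_fmt moves 0
    simpa using h0
  rw [hA]
  unfold PySem.Str.join
  apply congrArg
  have hJ := join_tokens 0 moves result
  simpa using hJ.symm
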